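-- pv_equiv track=rewrite | github.com/Dav1111111/seo | backend/app/core_audit/demand_map/expander.py | _is_competitor_brand_hit
-- ===== SOURCE A (Python) =====
-- from typing import Any, Iterable, Mapping, Sequence
--
-- def _is_competitor_brand_hit(
--     slots: Mapping[str, str], competitor_brands: Sequence[str]
-- ) -> bool:
--     """Return True if any slot value matches a competitor brand (case-insensitive)."""
--     if not competitor_brands:
--         return False
--     lowered = {b.lower() for b in competitor_brands if b}
--     for v in slots.values():
--         if v and v.lower() in lowered:
--             return True
--     return False
-- ===== SOURCE B (Python) =====
-- from typing import Any, Iterable, Mapping, Sequence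
--
-- def _is_competitor_brand_hit(
--     slots: Mapping[str, str], competitor_brands: Sequence[str]
-- ) -> bool:
--     """Return True if any slot value matches a competitor brand (case-insensitive)."""
--     xs = sorted(v.lower() for v in slots.values() if v)
--     ys = sorted(b.lower() for b in competitor_brands if b)
--     i = j = 0
--     while i < len(xs) and j < len(ys):
--         if xs[i] == ys[j]:
--             return True
--         if xs[i] < ys[j]:
--             i += 1
--         else:
--             j += 1
--     return False
-- ===== Notes on version B (the rewrite author's own statement) =====
-- stated objective: alternative
-- what changed: Replaces the hash-set membership scan (early return on empty brands, lowered brand set, per-value lookup with short-circuit) by sorting both lowered lists and finding a common element with a two-pointer ordered-merge scan.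
import Mathlib
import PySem

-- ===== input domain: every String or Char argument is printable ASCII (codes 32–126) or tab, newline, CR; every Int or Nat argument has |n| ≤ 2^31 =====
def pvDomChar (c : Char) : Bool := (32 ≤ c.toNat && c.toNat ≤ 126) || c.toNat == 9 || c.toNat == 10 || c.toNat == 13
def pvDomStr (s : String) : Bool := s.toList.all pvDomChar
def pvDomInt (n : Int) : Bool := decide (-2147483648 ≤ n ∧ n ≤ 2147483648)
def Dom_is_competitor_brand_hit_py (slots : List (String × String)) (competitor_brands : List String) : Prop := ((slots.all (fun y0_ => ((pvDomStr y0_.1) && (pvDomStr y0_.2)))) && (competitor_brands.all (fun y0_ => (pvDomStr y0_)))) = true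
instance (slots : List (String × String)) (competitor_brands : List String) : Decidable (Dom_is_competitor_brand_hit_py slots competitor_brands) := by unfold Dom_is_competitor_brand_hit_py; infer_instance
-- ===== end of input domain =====

-- B replaces A's hash-set membership scan by sorting both lowered lists and
-- finding a common element with a two-pointer ordered-merge scan (alternative; same task, different algorithm).

-- ===== PORT A =====
def pvALoop (lowered : PySem.Set String) : List String → Bool
  | [] => false
  | v :: rest =>
    if (v != "") && PySem.Set.contains lowered (PySem.Str.lower v) then true
    else pvALoop lowered rest

-- A: early return on empty brands, build the lowered brand set, scan dict values with short-circuit.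
def is_competitor_brand_hit_py (slots : List (String × String)) (competitor_brands : List String) : Bool :=
  if competitor_brands = [] then false
  else
    let lowered : PySem.Set String :=
      PySem.Set.ofList ((competitor_brands.filter (fun b => b != "")).map PySem.Str.lower)
    pvALoop lowered (PySem.Dict.ofList slots).values

-- ===== PORT B =====
-- B's while-loop over the two indices i, j transcribed as recursion on the two suffixes.
def pvMerge : List String → List String → Bool
  | [], _ => false
  | _ :: _, [] => false
  | x :: xs, y :: ys =>
    if x == y then true
    else if x < y then pvMerge xs (y :: ys)
    else pvMerge (x :: xs) ys
termination_by s t => s.length + t.length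

-- B: sort both lowered lists, two-pointer merge scan for a common element.
def is_competitor_brand_hit_py_alt (slots : List (String × String)) (competitor_brands : List String) : Bool :=
  let xs := PySem.List.sorted (((PySem.Dict.ofList slots).values.filter (fun v => v != "")).map PySem.Str.lower) (fun x => x) false
  let ys := PySem.List.sorted ((competitor_brands.filter (fun b => b != "")).map PySem.Str.lower) (fun x => x) false
  pvMerge xs ys

-- ===== PRECONDITION & SPEC =====
def Spec_is_competitor_brand_hit_py (slots : List (String × String)) (competitor_brands : List String) (out : Bool) : Prop := out = is_competitor_brand_hit_py_alt slots competitor_brands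
instance (slots : List (String × String)) (competitor_brands : List String) (out : Bool) : Decidable (Spec_is_competitor_brand_hit_py slots competitor_brands out) := by unfold Spec_is_competitor_brand_hit_py; infer_instance

-- ===== CLAIM (what is proved, stated in full; the proofs are below) =====
def Claim_equal_is_competitor_brand_hit_py : Prop := ∀ (slots : List (String × String)) (competitor_brands : List String), Dom_is_competitor_brand_hit_py slots competitor_brands → Spec_is_competitor_brand_hit_py slots competitor_brands (is_competitor_brand_hit_py slots competitor_brands)

-- ===== LEMMAS AND PROOFS =====

lemma pvALoop_eq_any (L : PySem.Set String) (vs : List String) :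
    pvALoop L vs = vs.any (fun v => (v != "") && PySem.Set.contains L (PySem.Str.lower v)) := by
  induction vs with
  | nil => rfl
  | cons v rest ih =>
    simp only [pvALoop, List.any_cons]
    split_ifs with h
    · rw [h, Bool.true_or]
    · rw [Bool.not_eq_true] at h
      rw [h, Bool.false_or, ih]

-- merge scan on two ≤-sorted lists decides whether they share an element
lemma pvMerge_nil_right : ∀ (s : List String), pvMerge s [] = false
  | [] => by rw [pvMerge]
  | _ :: _ => by rw [pvMerge]

lemma pvMerge_correct : ∀ (s t : List String),
    s.Pairwise (· ≤ ·) → t.Pairwise (· ≤ ·) →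
    (pvMerge s t = true ↔ ∃ z, z ∈ s ∧ z ∈ t)
  | [], t, _, _ => by simp [pvMerge]
  | x :: xs, [], _, _ => by simp [pvMerge]
  | x :: xs, y :: ys, hs, ht => by
    rw [pvMerge]
    rcases List.pairwise_cons.mp hs with ⟨hxall, hxs⟩
    rcases List.pairwise_cons.mp ht with ⟨hyall, hys⟩
    by_cases hxy : x = y
    · simp only [hxy, beq_self_eq_true, if_true, true_iff]
      exact ⟨y, by simp, by simp⟩
    · rw [if_neg (by simpa using hxy)]
      by_cases hlt : x < y
      · rw [if_pos hlt, pvMerge_correct xs (y :: ys) hxs ht]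
        constructor
        · rintro ⟨z, hz1, hz2⟩; exact ⟨z, List.mem_cons_of_mem _ hz1, hz2⟩
        · rintro ⟨z, hz1, hz2⟩
          rcases List.mem_cons.mp hz1 with rfl | hz1
          · -- z = x lies in y :: ys, but every element there is ≥ y > x: contradiction
            exfalso
            rcases List.mem_cons.mp hz2 with h | hz2
            · exact hxy h
            · exact absurd (hyall _ hz2) (not_le.mpr hlt)
          · exact ⟨z, hz1, hz2⟩
      · rw [if_neg hlt, pvMerge_correct (x :: xs) ys hs hys]
        have hyx : y < x := lt_of_le_of_ne (not_lt.mp hlt) (fun h => hxy h.symm)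
        constructor
        · rintro ⟨z, hz1, hz2⟩; exact ⟨z, hz1, List.mem_cons_of_mem _ hz2⟩
        · rintro ⟨z, hz1, hz2⟩
          rcases List.mem_cons.mp hz2 with rfl | hz2
          · exfalso
            rcases List.mem_cons.mp hz1 with h | hz1
            · exact hxy h.symm
            · exact absurd (hxall _ hz1) (not_le.mpr hyx)
          · exact ⟨z, hz1, hz2⟩
termination_by s t => s.length + t.length

-- ===== VERDICT (by name: the statement is the Claim_ definition above) =====
theorem is_competitor_brand_hit_py_spec : Claim_equal_is_competitor_brand_hit_py := by
  intro slots competitor_brands _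
  unfold Spec_is_competitor_brand_hit_py is_competitor_brand_hit_py is_competitor_brand_hit_py_alt
  rcases eq_or_ne competitor_brands [] with h | h
  · subst h
    have hnil : PySem.List.sorted ([] : List String) (fun x => x) false = [] :=
      (PySem.List.sorted_eq_nil_iff [] (fun x => x) false).mpr rfl
    simp [hnil, pvMerge_nil_right]
  · rw [if_neg h]
    rw [pvALoop_eq_any,
      show (pvMerge
          (PySem.List.sorted (((PySem.Dict.ofList slots).values.filter (fun v => v != "")).map PySem.Str.lower) (fun x => x) false)
          (PySem.List.sorted ((competitor_brands.filter (fun b => b != "")).map PySem.Str.lower) (fun x => x) false))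
        = decide (∃ z, z ∈ PySem.List.sorted (((PySem.Dict.ofList slots).values.filter (fun v => v != "")).map PySem.Str.lower) (fun x => x) false
            ∧ z ∈ PySem.List.sorted ((competitor_brands.filter (fun b => b != "")).map PySem.Str.lower) (fun x => x) false) from by
        rw [Bool.eq_iff_iff, decide_eq_true_iff]
        exact pvMerge_correct _ _ (PySem.List.sorted_pairwise _ _) (PySem.List.sorted_pairwise _ _)]
    rw [Bool.eq_iff_iff, decide_eq_true_iff]
    simp only [List.any_eq_true, Bool.and_eq_true, bne_iff_ne, PySem.Set.contains_iff,
      PySem.Set.mem_ofList, PySem.List.mem_sorted, List.mem_map, List.mem_filter, ne_eq]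
    constructor
    · rintro ⟨v, hv, hne, b, hb, hlb⟩
      exact ⟨PySem.Str.lower v, ⟨v, ⟨hv, by simpa using hne⟩, rfl⟩, b, hb, hlb⟩
    · rintro ⟨x, ⟨v, ⟨hv, hne⟩, rfl⟩, b, hb, hlb⟩
      exact ⟨v, hv, by simpa using hne, b, hb, hlb⟩
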